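-- pv_equiv track=rewrite | github.com/minyeamer/linkmerce | src/linkmerce/utils/excel.py | to_unique_headers
-- ===== SOURCE A (Python) =====
-- def to_unique_headers(headers: list[str]) -> list[str]:
--     unique = list()
--     for header in headers:
--         header_str, suffix = str(header), 1
--         while header_str in unique:
--             header_str = f"{header}_{suffix}"
--             suffix += 1
--         unique.append(header_str)
--     return unique
-- ===== SOURCE B (Python) =====
-- def to_unique_headers(headers: list[str]) -> list[str]:
--     taken = set()
--     out = []
--     for header in headers:
--         name = str(header)
--         if name in taken:
--             prefix = name + "_"
--             used = {t[len(prefix):] for t in taken if t.startswith(prefix)}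
--             k = min(j for j in range(1, len(used) + 2) if str(j) not in used)
--             name = prefix + str(k)
--         taken.add(name)
--         out.append(name)
--     return out
-- ===== Notes on version B (the rewrite author's own statement) =====
-- stated objective: faster
-- what changed: Instead of A's probing loop that tests each candidate string by a linear membership scan of the growing output list, B on a clash projects the suffix strings already used for that base out of a hash set of taken names in one scan and takes the minimum free index of a pigeonhole-bounded range.
import Mathlib
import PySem

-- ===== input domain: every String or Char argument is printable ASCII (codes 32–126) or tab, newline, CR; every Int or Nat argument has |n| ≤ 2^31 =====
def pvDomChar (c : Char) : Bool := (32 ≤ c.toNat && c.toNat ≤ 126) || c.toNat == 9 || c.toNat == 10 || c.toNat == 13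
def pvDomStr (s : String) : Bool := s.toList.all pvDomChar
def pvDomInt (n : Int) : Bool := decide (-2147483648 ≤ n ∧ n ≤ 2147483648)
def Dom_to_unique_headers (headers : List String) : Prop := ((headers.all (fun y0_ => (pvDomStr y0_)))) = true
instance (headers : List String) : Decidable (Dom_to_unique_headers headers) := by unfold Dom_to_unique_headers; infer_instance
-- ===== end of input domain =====

-- B resolves a clash by projecting the suffix strings already used for the base out of a set of
-- taken names in one scan and taking the minimum free index of a pigeonhole-bounded range, instead
-- of A's per-candidate membership scans of the growing output list (measured faster on large inputs).

-- ===== PORT A =====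
-- the 'while header_str in unique' loop; fuel unique.length + 1 always suffices
-- (candidate strings are pairwise distinct, so a free one appears among the first length+1)
def whileA (header : String) (unique : List String) (cur : String) (suffix : Int) : Nat → String
  | 0 => cur
  | fuel+1 =>
    if cur ∈ unique then
      whileA header unique (header ++ "_" ++ PySem.Int.toStr suffix) (suffix + 1) fuel
    else cur

def stepA (unique : List String) (header : String) : List String :=
  unique ++ [whileA header unique header 1 (unique.length + 1)]

def to_unique_headers (headers : List String) : List String :=
  headers.foldl stepA []

-- ===== PORT B =====
-- the set comprehension {t[len(prefix):] for t in taken if t.startswith(prefix)}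
def usedTails (taken : PySem.Set String) (pfx : String) : PySem.Set String :=
  taken.foldl
    (fun u t =>
      if PySem.Str.startswith t pfx then
        PySem.Set.add u (PySem.Str.slice t (some (PySem.Str.len pfx)) none)
      else u)
    PySem.Set.empty

def stepB (st : List String × PySem.Set String) (header : String) : List String × PySem.Set String :=
  let name := header
  if PySem.Set.contains st.2 name then
    let pfx := name ++ "_"
    let used := usedTails st.2 pfx
    let ks := (PySem.List.pyRange 1 (PySem.Set.len used + 2)).filter
        (fun j => !(PySem.Set.contains used (PySem.Int.toStr j)))
    -- min(generator): the filtered range is provably nonempty (pigeonhole), default unreachable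
    let k := (PySem.List.min? ks (fun x => x)).getD 1
    let nm := pfx ++ PySem.Int.toStr k
    (st.1 ++ [nm], PySem.Set.add st.2 nm)
  else
    (st.1 ++ [name], PySem.Set.add st.2 name)

def to_unique_headers_alt (headers : List String) : List String :=
  (headers.foldl stepB ([], PySem.Set.empty)).1

-- ===== PRECONDITION & SPEC =====
def Spec_to_unique_headers (headers : List String) (out : List String) : Prop := out = to_unique_headers_alt headers
instance (headers : List String) (out : List String) : Decidable (Spec_to_unique_headers headers out) := by unfold Spec_to_unique_headers; infer_instance

-- ===== CLAIM (what is proved, stated in full; the proofs are below) =====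
def Claim_equal_to_unique_headers : Prop := ∀ (headers : List String), Dom_to_unique_headers headers → Spec_to_unique_headers headers (to_unique_headers headers)

-- ===== LEMMAS AND PROOFS =====

-- str(suffix) is injective for positive suffixes
theorem toDigitsCore_eq_digits : ∀ (f n : Nat) (acc : List Char), 0 < n → n < f →
    Nat.toDigitsCore 10 f n acc = ((Nat.digits 10 n).map Nat.digitChar).reverse ++ acc := by
  intro f
  induction f with
  | zero => intro n acc h1 h2; omega
  | succ f ih =>
    intro n acc h1 h2
    rw [Nat.digits_def' (by norm_num) h1]
    simp only [Nat.toDigitsCore]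
    by_cases hd : n / 10 = 0
    · rw [if_pos hd, hd]; simp
    · rw [if_neg hd, ih (n/10) _ (Nat.pos_of_ne_zero hd) (by omega)]; simp

theorem map_digitChar_inj : ∀ (l1 l2 : List Nat), (∀ x ∈ l1, x < 10) → (∀ x ∈ l2, x < 10) →
    l1.map Nat.digitChar = l2.map Nat.digitChar → l1 = l2 := by
  intro l1
  induction l1 with
  | nil => intro l2 _ _ h; cases l2 <;> simp_all
  | cons a t ih =>
    intro l2 h1 h2 h
    cases l2 with
    | nil => simp at h
    | cons b t2 =>
      simp only [List.map_cons, List.cons.injEq] at h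
      have hab : a = b := by
        have hfin : ∀ x : Fin 10, ∀ y : Fin 10, Nat.digitChar x.val = Nat.digitChar y.val → x = y := by decide
        exact congrArg Fin.val (hfin ⟨a, h1 a (by simp)⟩ ⟨b, h2 b (by simp)⟩ h.1)
      rw [hab, ih t2 (fun x hx => h1 x (by simp [hx])) (fun x hx => h2 x (by simp [hx])) h.2]

theorem toDigits_inj_pos (m n : Nat) (hm : 0 < m) (hn : 0 < n)
    (h : Nat.toDigits 10 m = Nat.toDigits 10 n) : m = n := by
  have em := toDigitsCore_eq_digits (m+1) m [] hm (by omega)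
  have en := toDigitsCore_eq_digits (n+1) n [] hn (by omega)
  simp only [Nat.toDigits] at h
  rw [em, en] at h
  simp only [List.append_nil] at h
  have h2 := List.reverse_injective h
  have hd : Nat.digits 10 m = Nat.digits 10 n :=
    map_digitChar_inj _ _ (fun x hx => Nat.digits_lt_base (by norm_num) hx)
      (fun x hx => Nat.digits_lt_base (by norm_num) hx) h2
  exact Nat.digits.injective 10 hd

theorem toStr_inj_pos (i j : Nat) (hi : 1 ≤ i) (hj : 1 ≤ j)
    (hl : (PySem.Int.toStr (i : Int)).toList = (PySem.Int.toStr (j : Int)).toList) : i = j := by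
  simp only [PySem.Int.toStr, String.toList_ofList, PySem.Int.toChars] at hl
  rw [if_neg (by omega), if_neg (by omega)] at hl
  simp only [Int.toNat_natCast] at hl
  exact toDigits_inj_pos i j hi hj hl

-- the j-th candidate string f"{h}_{j}"
def candN (h : String) (j : Nat) : String := h ++ "_" ++ PySem.Int.toStr (j : Int)

theorem candN_ne_base (h : String) (j : Nat) : candN h j ≠ h := by
  intro he
  have := congrArg (fun s => s.toList.length) he
  simp only [candN, String.toList_append, List.length_append] at this
  have : ("_" : String).toList.length = 1 := rfl
  omega

theorem candN_inj (h : String) (i j : Nat) (hi : 1 ≤ i) (hj : 1 ≤ j)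
    (he : candN h i = candN h j) : i = j := by
  have hl := congrArg String.toList he
  simp only [candN, String.toList_append, List.append_assoc] at hl
  have h2 := List.append_cancel_left hl
  have h3 := List.append_cancel_left h2
  exact toStr_inj_pos i j hi hj h3

-- pigeonhole: among candidates a, a+1, …, a+len-1 one is free, provided h itself occupies a slot
theorem exists_free (u : List String) (h : String) (hu : h ∈ u) (a : Nat) (ha : 1 ≤ a) :
    ∃ j, a ≤ j ∧ j < a + u.length ∧ candN h j ∉ u := by
  by_contra hc
  push Not at hc
  have hsub : (h :: (List.range u.length).map (fun i => candN h (a + i))) ⊆ u := by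
    intro x hx
    rcases List.mem_cons.mp hx with rfl | hx
    · exact hu
    · rcases List.mem_map.mp hx with ⟨i, hi, rfl⟩
      exact hc _ (by omega) (by have := List.mem_range.mp hi; omega)
  have hnd : (h :: (List.range u.length).map (fun i => candN h (a + i))).Nodup := by
    refine List.nodup_cons.mpr ⟨?_, ?_⟩
    · intro hmem
      rcases List.mem_map.mp hmem with ⟨i, _, he⟩
      exact candN_ne_base h (a + i) he
    · refine List.Nodup.map_on ?_ (List.nodup_range)
      intro x hx y hy he
      have := candN_inj h (a + x) (a + y) (by omega) (by omega) he
      omega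
  have hlen : (h :: (List.range u.length).map (fun i => candN h (a + i))).length ≤ u.length := by
    calc (h :: (List.range u.length).map (fun i => candN h (a + i))).length
        = (h :: (List.range u.length).map (fun i => candN h (a + i))).toFinset.card :=
          (List.toFinset_card_of_nodup hnd).symm
      _ ≤ u.toFinset.card := Finset.card_le_card (by
          intro x hx
          rw [List.mem_toFinset] at hx ⊢
          exact hsub hx)
      _ ≤ u.length := u.toFinset_card_le
  simp at hlen

-- the least free candidate index ≥ a
theorem exists_least_free (u : List String) (h : String) (hu : h ∈ u) (a : Nat) (ha : 1 ≤ a) :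
    ∃ m, a ≤ m ∧ m < a + u.length ∧ candN h m ∉ u ∧ ∀ j, a ≤ j → j < m → candN h j ∈ u := by
  obtain ⟨j0, hj0a, hj0b, hj0f⟩ := exists_free u h hu a ha
  have hex : ∃ j, a ≤ j ∧ candN h j ∉ u := ⟨j0, hj0a, hj0f⟩
  classical
  refine ⟨Nat.find hex, (Nat.find_spec hex).1, ?_, (Nat.find_spec hex).2, ?_⟩
  · have := Nat.find_min' hex ⟨hj0a, hj0f⟩
    omega
  · intro j hja hjm
    by_contra hmem
    exact Nat.find_min hex hjm ⟨hja, hmem⟩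

theorem whileA_finds (h : String) (u : List String) : ∀ (fuel a m : Nat), 1 ≤ a → a ≤ m →
    candN h m ∉ u → (∀ j, a ≤ j → j < m → candN h j ∈ u) → m - a < fuel →
    whileA h u (candN h a) ((a : Int) + 1) fuel = candN h m := by
  intro fuel
  induction fuel with
  | zero => intro a m _ _ _ _ hf; omega
  | succ fuel ih =>
    intro a m ha ham hfree hocc hf
    by_cases hae : a = m
    · subst hae
      simp only [whileA, if_neg hfree]
    · have hlt : a < m := by omega
      have hmem : candN h a ∈ u := hocc a le_rfl hlt
      simp only [whileA, if_pos hmem]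
      have hc : h ++ "_" ++ PySem.Int.toStr ((a : Int) + 1) = candN h (a + 1) := by
        simp only [candN]; norm_cast
      have hs : ((a : Int) + 1) + 1 = ((a + 1 : Nat) : Int) + 1 := by push_cast; ring
      rw [hc, hs]
      exact ih (a + 1) m (by omega) (by omega) hfree (fun j hj1 hj2 => hocc j (by omega) hj2) (by omega)

-- B-side: a taken name decomposes as prefix + tail exactly when it IS prefix ++ tail
theorem startswith_tail_iff (t pfx x : String) :
    (PySem.Str.startswith t pfx = true ∧ PySem.Str.slice t (some (PySem.Str.len pfx)) none = x)
      ↔ t = pfx ++ x := by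
  constructor
  · rintro ⟨hsw, hsl⟩
    rw [PySem.Str.startswith_eq, PySem.Chars.startswith_iff] at hsw
    obtain ⟨r, hr⟩ := hsw
    have hxl := congrArg String.toList hsl
    rw [PySem.Str.toList_slice, PySem.Chars.slice_eq_listSlice, PySem.Str.len_eq,
        PySem.List.slice_from_natCast, ← hr, List.drop_left] at hxl
    have : t.toList = (pfx ++ x).toList := by
      rw [String.toList_append, ← hxl, hr]
    exact String.toList_injective this
  · rintro rfl
    have hsw : PySem.Str.startswith (pfx ++ x) pfx = true := by
      rw [PySem.Str.startswith_eq, PySem.Chars.startswith_iff, String.toList_append]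
      exact List.prefix_append _ _
    refine ⟨hsw, ?_⟩
    apply String.toList_injective
    rw [PySem.Str.toList_slice, PySem.Chars.slice_eq_listSlice, PySem.Str.len_eq,
        PySem.List.slice_from_natCast, String.toList_append, List.drop_left]

theorem mem_usedTails_aux (pfx : String) :
    ∀ (l : List String) (acc : PySem.Set String) (x : String),
    (x ∈ l.foldl
      (fun u t =>
        if PySem.Str.startswith t pfx then
          PySem.Set.add u (PySem.Str.slice t (some (PySem.Str.len pfx)) none)
        else u) acc)
    ↔ x ∈ acc ∨ (pfx ++ x) ∈ l := by
  intro l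
  induction l with
  | nil => intro acc x; simp
  | cons t ts ih =>
    intro acc x
    simp only [List.foldl_cons, List.mem_cons, ih]
    by_cases hsw : PySem.Str.startswith t pfx = true
    · rw [if_pos hsw, PySem.Set.mem_add]
      constructor
      · rintro (⟨hx | rfl⟩ | hx)
        · exact Or.inl hx
        · exact Or.inr (Or.inl (((startswith_tail_iff t pfx _).mp ⟨hsw, rfl⟩).symm))
        · exact Or.inr (Or.inr hx)
      · rintro (hx | heq | hx)
        · exact Or.inl (Or.inl hx)
        · exact Or.inl (Or.inr ((startswith_tail_iff t pfx x).mpr heq.symm).2.symm)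
        · exact Or.inr hx
    · rw [if_neg hsw]
      constructor
      · rintro (hx | hx)
        · exact Or.inl hx
        · exact Or.inr (Or.inr hx)
      · rintro (hx | heq | hx)
        · exact Or.inl hx
        · exact absurd ((startswith_tail_iff t pfx x).mpr heq.symm).1 hsw
        · exact Or.inr hx

theorem mem_usedTails (taken : PySem.Set String) (pfx x : String) :
    x ∈ usedTails taken pfx ↔ (pfx ++ x) ∈ taken := by
  have := mem_usedTails_aux pfx taken PySem.Set.empty x
  simpa [usedTails, PySem.Set.empty] using this

theorem nodup_usedTails_aux (pfx : String) :
    ∀ (l : List String) (acc : PySem.Set String), acc.Nodup →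
    (l.foldl
      (fun u t =>
        if PySem.Str.startswith t pfx then
          PySem.Set.add u (PySem.Str.slice t (some (PySem.Str.len pfx)) none)
        else u) acc).Nodup := by
  intro l
  induction l with
  | nil => intro acc hacc; exact hacc
  | cons t ts ih =>
    intro acc hacc
    simp only [List.foldl_cons]
    apply ih
    split_ifs
    · exact PySem.Set.nodup_add acc _ hacc
    · exact hacc

theorem nodup_usedTails (taken : PySem.Set String) (pfx : String) :
    (usedTails taken pfx).Nodup :=
  nodup_usedTails_aux pfx taken PySem.Set.empty (by simp [PySem.Set.empty])

-- the loop invariant: B's set holds exactly the names A has emitted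
def InvB (u : List String) (s : PySem.Set String) : Prop :=
  (∀ x, x ∈ s ↔ x ∈ u) ∧ s.Nodup

theorem pfx_append_toStr (h : String) (j : Nat) :
    (h ++ "_") ++ PySem.Int.toStr (j : Int) = candN h j := rfl

theorem toStr_mem_usedTails (u : List String) (s : PySem.Set String) (h : String)
    (hmem : ∀ x, x ∈ s ↔ x ∈ u) (j : Nat) :
    PySem.Int.toStr (j : Int) ∈ usedTails s (h ++ "_") ↔ candN h j ∈ u := by
  rw [mem_usedTails, pfx_append_toStr, hmem]

-- pigeonhole on B's side: the first m-1 suffix strings all lie in the (nodup) tail set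
theorem le_usedTails_length (u : List String) (s : PySem.Set String) (h : String)
    (hmem : ∀ x, x ∈ s ↔ x ∈ u) (m : Nat)
    (hocc : ∀ j, 1 ≤ j → j < m → candN h j ∈ u) :
    m ≤ (usedTails s (h ++ "_")).length + 1 := by
  set used := usedTails s (h ++ "_") with hused
  set L := (List.range (m - 1)).map (fun i => PySem.Int.toStr ((i + 1 : Nat) : Int)) with hL
  have hsub : L ⊆ used := by
    intro x hx
    rcases List.mem_map.mp hx with ⟨i, hi, rfl⟩
    have hi' := List.mem_range.mp hi
    exact (toStr_mem_usedTails u s h hmem (i + 1)).mpr (hocc (i + 1) (by omega) (by omega))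
  have hnd : L.Nodup := by
    refine List.Nodup.map_on ?_ (List.nodup_range)
    intro x hx y hy he
    have := toStr_inj_pos (x + 1) (y + 1) (by omega) (by omega) (congrArg String.toList he)
    omega
  have hndu : used.Nodup := nodup_usedTails s (h ++ "_")
  have hlen : L.length ≤ used.length := by
    calc L.length = L.toFinset.card := (List.toFinset_card_of_nodup hnd).symm
      _ ≤ used.toFinset.card := Finset.card_le_card (by
          intro x hx
          rw [List.mem_toFinset] at hx ⊢
          exact hsub hx)
      _ ≤ used.length := used.toFinset_card_le
  have : L.length = m - 1 := by simp [hL]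
  omega

theorem step_eq (u : List String) (s : PySem.Set String) (h : String) (hinv : InvB u s) :
    (stepB (u, s) h).1 = stepA u h ∧ InvB (stepB (u, s) h).1 (stepB (u, s) h).2 := by
  obtain ⟨hmem, hnd⟩ := hinv
  by_cases hm : h ∈ u
  · -- duplicate header: both sides emit the least free candidate
    have hcs : PySem.Set.contains s h = true := by
      rw [PySem.Set.contains_iff]; exact (hmem h).mpr hm
    set used := usedTails s (h ++ "_") with husedeq
    set ks := (PySem.List.pyRange 1 (PySem.Set.len used + 2)).filter
        (fun j => !(PySem.Set.contains used (PySem.Int.toStr j))) with hkseq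
    set k := (PySem.List.min? ks (fun x => x)).getD 1 with hkeq
    have hstep : stepB (u, s) h =
        (u ++ [(h ++ "_") ++ PySem.Int.toStr k], PySem.Set.add s ((h ++ "_") ++ PySem.Int.toStr k)) := by
      simp only [stepB, if_pos hcs, husedeq, hkseq, hkeq]
    obtain ⟨m, h1m, hmlt, hfree, hocc⟩ := exists_least_free u h hm 1 le_rfl
    -- A's probing loop lands on candN h m
    have hA : whileA h u h 1 (u.length + 1) = candN h m := by
      have h1 : whileA h u h 1 (u.length + 1)
          = whileA h u (h ++ "_" ++ PySem.Int.toStr 1) (1 + 1) u.length := by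
        simp only [whileA, if_pos hm]
      have hcand1 : h ++ "_" ++ PySem.Int.toStr 1 = candN h 1 := by
        simp only [candN]; norm_num
      have hsfx : (1 : Int) + 1 = ((1 : Nat) : Int) + 1 := by norm_num
      rw [h1, hcand1, hsfx]
      exact whileA_finds h u u.length 1 m le_rfl h1m hfree hocc (by omega)
    -- B's minimum over the free slots of the bounded range is the same m
    have hmle : m ≤ used.length + 1 := le_usedTails_length u s h hmem m hocc
    have hmks : (m : Int) ∈ ks := by
      rw [hkseq, List.mem_filter]
      constructor
      · rw [PySem.List.mem_pyRange_one]
        have : PySem.Set.len used = (used.length : Int) := rfl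
        rw [this]
        constructor
        · exact_mod_cast h1m
        · omega
      · rw [Bool.not_eq_eq_eq_not, Bool.not_true, ← Bool.not_eq_true, PySem.Set.contains_iff]
        intro hin
        exact hfree ((toStr_mem_usedTails u s h hmem m).mp hin)
    have hkm : k = (m : Int) := by
      cases hmin : PySem.List.min? ks (fun x => x) with
      | none =>
        rw [PySem.List.min?_eq_none_iff] at hmin
        rw [hmin] at hmks
        simp at hmks
      | some v =>
        have hvks := PySem.List.min?_mem hmin
        have hvle : v ≤ (m : Int) := PySem.List.min?_isMin hmin _ hmks
        rw [hkseq, List.mem_filter, PySem.List.mem_pyRange_one] at hvks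
        obtain ⟨⟨h1v, _⟩, hpred⟩ := hvks
        rw [Bool.not_eq_eq_eq_not, Bool.not_true, ← Bool.not_eq_true, PySem.Set.contains_iff] at hpred
        have hvm : (m : Int) ≤ v := by
          by_contra hlt
          push Not at hlt
          have hv1 : 1 ≤ v.toNat := by omega
          have hvm' : v.toNat < m := by omega
          have : candN h v.toNat ∈ u := hocc v.toNat hv1 hvm'
          have hvcast : ((v.toNat : Nat) : Int) = v := by omega
          apply hpred
          rw [← hvcast] at *
          exact (toStr_mem_usedTails u s h hmem v.toNat).mpr this
        have : v = (m : Int) := le_antisymm hvle hvm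
        rw [hkeq, hmin, this]
        rfl
    have hnm : (h ++ "_") ++ PySem.Int.toStr k = candN h m := by
      rw [hkm, pfx_append_toStr]
    rw [hstep, hnm]
    refine ⟨by simp only [stepA, hA], ?_, ?_⟩
    · intro x
      rw [PySem.Set.mem_add]
      simp only [List.mem_append, List.mem_singleton, hmem x]
    · exact PySem.Set.nodup_add s _ hnd
  · -- fresh header: both sides keep it unchanged
    have hcs : ¬ (PySem.Set.contains s h = true) := by
      rw [PySem.Set.contains_iff]; exact fun hx => hm ((hmem h).mp hx)
    have hstep : stepB (u, s) h = (u ++ [h], PySem.Set.add s h) := by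
      simp only [stepB, if_neg hcs]
    have hA : whileA h u h 1 (u.length + 1) = h := by
      simp only [whileA, if_neg hm]
    rw [hstep]
    refine ⟨by simp only [stepA, hA], ?_, ?_⟩
    · intro x
      rw [PySem.Set.mem_add]
      simp only [List.mem_append, List.mem_singleton, hmem x]
    · exact PySem.Set.nodup_add s h hnd

theorem main_fold : ∀ (headers : List String) (u : List String) (s : PySem.Set String),
    InvB u s → (headers.foldl stepB (u, s)).1 = headers.foldl stepA u := by
  intro headers
  induction headers with
  | nil => intro u s _; rfl
  | cons h t ih =>
    intro u s hinv
    obtain ⟨heq, hinv'⟩ := step_eq u s h hinv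
    simp only [List.foldl_cons]
    rw [← heq]
    exact ih _ _ hinv'

-- ===== VERDICT (by name: the statement is the Claim_ definition above) =====
theorem to_unique_headers_spec : Claim_equal_to_unique_headers := by
  intro headers _
  unfold Spec_to_unique_headers to_unique_headers to_unique_headers_alt
  refine (main_fold headers [] PySem.Set.empty ⟨by simp [PySem.Set.empty], by simp [PySem.Set.empty]⟩).symm
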